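-- pv_equiv track=rewrite | github.com/cgong99/text_based_SD | Text_Based_SD/alignment/Text-DER.py | getSpkAlignInfo
-- ===== SOURCE A (Python) =====
-- def getSpkAlignInfo(utterance, hyp_align, hyp_index):
--   utt_len = getUtteranceLen(utterance)
--   spk_dict = {}
--   for i in range(utt_len):
--     spk, index = getSpkIndex(hyp_align[hyp_index])
--     if not spk: # no aligned speaker to gt
--       hyp_index += 1
--       continue
--     elif spk not in spk_dict:
--       spk_dict[spk] = (index, index)
--     else:
--       start = spk_dict[spk][0]
--       end = spk_dict[spk][1]
--       spk_dict[spk] = (min(index, start), max(index, end))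
--     hyp_index += 1
--   return spk_dict, hyp_index
--
-- def getUtteranceLen(utterance):
--   # TODO: may need to use the ref length?
--   return len(utterance.split(" ")[1:])
--
-- def getSpkIndex(align: str):
--   # input "a-1"
--   if align == "-":
--     return None, None
--   res = align.split("-")
--   return res[0], res[1]
-- ===== SOURCE B (Python) =====
-- def getSpkAlignInfo(utterance, hyp_align, hyp_index):
--   n = len(utterance.split(" ")[1:])
--   groups = {}
--   for i in range(n):
--     s = hyp_align[hyp_index + i]
--     parts = s.split("-")
--     if s != "-" and parts[0]:
--       groups.setdefault(parts[0], []).append(parts[1])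
--   return {spk: (min(lst), max(lst)) for spk, lst in groups.items()}, hyp_index + n
-- ===== Notes on version B (the rewrite author's own statement) =====
-- stated objective: alternative
-- what changed: A keeps a running (min,max) pair per speaker updated inside the loop; B collects each speaker's index strings into per-speaker lists in one pass (setdefault/append), reduces them with a single min/max comprehension afterwards, and returns hyp_index + utt_len in closed form instead of incrementing it.
import Mathlib
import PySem

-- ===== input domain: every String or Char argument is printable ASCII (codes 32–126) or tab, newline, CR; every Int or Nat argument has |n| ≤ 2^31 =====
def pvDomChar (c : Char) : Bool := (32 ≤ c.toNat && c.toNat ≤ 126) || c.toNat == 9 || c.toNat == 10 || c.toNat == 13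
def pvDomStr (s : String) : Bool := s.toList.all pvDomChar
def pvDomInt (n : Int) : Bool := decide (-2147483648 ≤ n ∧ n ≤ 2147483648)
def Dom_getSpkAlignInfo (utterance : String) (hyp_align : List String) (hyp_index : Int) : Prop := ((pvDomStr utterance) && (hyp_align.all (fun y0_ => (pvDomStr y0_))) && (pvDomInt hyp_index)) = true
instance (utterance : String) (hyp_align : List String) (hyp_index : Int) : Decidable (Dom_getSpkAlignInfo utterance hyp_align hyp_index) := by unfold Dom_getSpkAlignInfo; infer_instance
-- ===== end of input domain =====

-- B replaces A's in-loop running (min,max) per speaker by collect-lists-then-reduce and a closed-form index sum (alternative decomposition, same cost; return-value equivalence).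


-- ===== PORT A =====
-- s.split(sep) for a nonempty literal sep (exact: PySem.Str.split? is none only for sep = "")
def pvSplit (s sep : String) : List String := (PySem.Str.split? s sep).getD []
def getUtteranceLen (utterance : String) : Nat :=
  ((pvSplit utterance " ").drop 1).length

-- getSpkIndex: 'none' overall = the IndexError on res[1] (align has no "-" and is not "-")
def getSpkIndex (align : String) : Option (Option String × Option String) :=
  if align = "-" then some (none, none)
  else
    let res := pvSplit align "-"
    match res[0]?, res[1]? with
    | some a, some b => some (some a, some b)
    | _, _ => none

-- the for-loop of A: fuel = remaining iterations (the loop body never reads i); none = an exception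
def aLoop (hyp_align : List String) :
    Nat → PySem.Dict String (String × String) → Int → Option (PySem.Dict String (String × String) × Int)
  | 0, d, hi => some (d, hi)
  | m + 1, d, hi =>
    match PySem.List.pyGet? hyp_align hi with
    | none => none
    | some s =>
      match getSpkIndex s with
      | none => none
      | some (spkO, idxO) =>
        match spkO, idxO with
        | some spk, some idx =>
          if spk = "" then aLoop hyp_align m d (hi + 1)
          else
            match (PySem.Dict.get? d spk) with
            | none => aLoop hyp_align m (d.insert spk (idx, idx)) (hi + 1)
            | some se => aLoop hyp_align m (d.insert spk (min idx se.1, max idx se.2)) (hi + 1)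
        | _, _ => aLoop hyp_align m d (hi + 1)

def getSpkAlignInfo (utterance : String) (hyp_align : List String) (hyp_index : Int) :
    (List (String × String × String)) × Int :=
  let utt_len := getUtteranceLen utterance
  match aLoop hyp_align utt_len PySem.Dict.empty hyp_index with
  | some r => (r.1.items, r.2)
  | none => ([], 0)   -- unreachable under Pre_ (A raises there)

-- ===== PORT B =====
def getSpkAlignInfo_alt (utterance : String) (hyp_align : List String) (hyp_index : Int) :
    (List (String × String × String)) × Int :=
  let n := ((pvSplit utterance " ").drop 1).length
  let groups : PySem.Dict String (List String) :=
    (List.range n).foldl (fun g (i : Nat) =>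
      let s := PySem.List.pyGetD hyp_align (hyp_index + (i : Int)) ""
      let parts := pvSplit s "-"
      if s ≠ "-" ∧ parts.headD "" ≠ "" then
        g.modify (parts.headD "") [] (fun l => l ++ [parts[1]?.getD ""])
      else g) PySem.Dict.empty
  (groups.items.map (fun q =>
      (q.1, ((PySem.List.min? q.2 (fun x => x)).getD "", (PySem.List.max? q.2 (fun x => x)).getD ""))),
   hyp_index + (n : Int))

-- ===== PRECONDITION & SPEC =====
-- Pre_ excludes exactly the inputs where Python A raises: an IndexError from hyp_align[hyp_index+i]
-- out of range, or an IndexError in getSpkIndex (an accessed entry other than "-" containing no "-").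
def Pre_getSpkAlignInfo (utterance : String) (hyp_align : List String) (hyp_index : Int) : Prop :=
  ∀ i : Nat, i < ((pvSplit utterance " ").drop 1).length →
    ∃ s, PySem.List.pyGet? hyp_align (hyp_index + (i : Int)) = some s ∧
      1 < (pvSplit s "-").length
instance (utterance : String) (hyp_align : List String) (hyp_index : Int) : Decidable (Pre_getSpkAlignInfo utterance hyp_align hyp_index) := by unfold Pre_getSpkAlignInfo; infer_instance
def pvWitness_getSpkAlignInfo : String × List String × Int := ("x w w", ["a-1", "b-2"], 0)

def Spec_getSpkAlignInfo (utterance : String) (hyp_align : List String) (hyp_index : Int) (out : (List (String × String × String)) × Int) : Prop := out = getSpkAlignInfo_alt utterance hyp_align hyp_index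
instance (utterance : String) (hyp_align : List String) (hyp_index : Int) (out : (List (String × String × String)) × Int) : Decidable (Spec_getSpkAlignInfo utterance hyp_align hyp_index out) := by unfold Spec_getSpkAlignInfo; infer_instance

-- ===== CLAIM (what is proved, stated in full; the proofs are below) =====
def Claim_equal_getSpkAlignInfo : Prop := ∀ (utterance : String) (hyp_align : List String) (hyp_index : Int), Dom_getSpkAlignInfo utterance hyp_align hyp_index → Pre_getSpkAlignInfo utterance hyp_align hyp_index → Spec_getSpkAlignInfo utterance hyp_align hyp_index (getSpkAlignInfo utterance hyp_align hyp_index)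
-- ===== LEMMAS AND PROOFS =====

-- parse one entry into (speaker, index); none = the entry contributes nothing ("-" or empty speaker)
def pvEntries (hyp_align : List String) (hi : Int) (m : Nat) : List String :=
  (List.range m).map (fun (j : Nat) => PySem.List.pyGetD hyp_align (hi + (j : Int)) "")

def pvParse (s : String) : Option (String × String) :=
  if s = "-" then none
  else
    let parts := pvSplit s "-"
    if parts.headD "" = "" then none
    else some (parts.headD "", parts[1]?.getD "")

def pvStepA (d : PySem.Dict String (String × String)) (p : String × String) :
    PySem.Dict String (String × String) :=
  d.insert p.1 (match PySem.Dict.get? d p.1 with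
    | none => (p.2, p.2)
    | some se => (min p.2 se.1, max p.2 se.2))

def pvStepB (g : PySem.Dict String (List String)) (p : String × String) :
    PySem.Dict String (List String) :=
  g.modify p.1 [] (fun l => l ++ [p.2])

theorem pv_foldl_filterMap {α β γ : Type} (l : List α) (f : α → Option β) (g : γ → β → γ) (init : γ) :
    (l.filterMap f).foldl g init
      = l.foldl (fun acc x => match f x with | none => acc | some y => g acc y) init := by
  induction l generalizing init with
  | nil => rfl
  | cons a t ih =>
    cases h : f a <;> simp [h, List.foldl_cons, ih]

theorem pv_aLoop_eq (hyp_align : List String) :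
    ∀ (m : Nat) (d : PySem.Dict String (String × String)) (hi : Int),
    (∀ j : Nat, j < m → ∃ s, PySem.List.pyGet? hyp_align (hi + (j : Int)) = some s ∧
        1 < (pvSplit s "-").length) →
    aLoop hyp_align m d hi
      = some (((pvEntries hyp_align hi m).filterMap pvParse).foldl pvStepA d, hi + (m : Int)) := by
  intro m
  induction m with
  | zero => intro d hi _; simp [aLoop, pvEntries]
  | succ m ih =>
    intro d hi h
    obtain ⟨s, hs, hgood⟩ := h 0 (Nat.succ_pos m)
    have hs' : PySem.List.pyGet? hyp_align hi = some s := by simpa using hs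
    have hsD : PySem.List.pyGetD hyp_align hi "" = s := by
      show (PySem.List.pyGet? hyp_align hi).getD "" = s
      rw [hs']; rfl
    have hshift : ∀ j : Nat, j < m → ∃ s, PySem.List.pyGet? hyp_align (hi + 1 + (j : Int)) = some s ∧
        1 < (pvSplit s "-").length := by
      intro j hj
      obtain ⟨t, ht, htg⟩ := h (j + 1) (by omega)
      exact ⟨t, by rw [show hi + 1 + (j : Int) = hi + ((j : Int) + 1) by ring]; exact_mod_cast ht, htg⟩
    have hent : pvEntries hyp_align hi (m + 1) = s :: pvEntries hyp_align (hi + 1) m := by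
      rw [pvEntries, List.range_succ_eq_map, List.map_cons, List.map_map]
      simp only [Nat.cast_zero, add_zero, hsD]
      refine congrArg (s :: ·) (List.map_congr_left ?_)
      intro j _
      simp only [Function.comp_apply]
      rw [show hi + ((j : Nat) + 1 : Nat) = hi + 1 + (j : Int) by push_cast; ring]
    rw [hent]
    by_cases hdash : s = "-"
    · subst hdash
      have hp : pvParse "-" = none := by simp [pvParse]
      simp only [aLoop, hs', getSpkIndex, List.filterMap_cons, hp]
      rw [ih d (hi + 1) hshift]
      refine congrArg some (Prod.ext rfl ?_)
      push_cast; ring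
    · rcases hres : pvSplit s "-" with _ | ⟨a, _ | ⟨b, t⟩⟩
      · rw [hres] at hgood; simp at hgood
      · rw [hres] at hgood; simp at hgood
      · have hgsi : getSpkIndex s = some (some a, some b) := by
          simp [getSpkIndex, hdash, hres]
        by_cases ha : a = ""
        · have hp : pvParse s = none := by simp [pvParse, hdash, hres, ha]
          simp only [aLoop, hs', hgsi, List.filterMap_cons, hp]
          rw [if_pos ha, ih d (hi + 1) hshift]
          refine congrArg some (Prod.ext rfl ?_)
          push_cast; ring
        · have hp : pvParse s = some (a, b) := by simp [pvParse, hdash, hres, ha]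
          have hstep : ∀ g, aLoop hyp_align m g (hi + 1)
              = some (((pvEntries hyp_align (hi + 1) m).filterMap pvParse).foldl pvStepA g,
                      hi + ((m : Int) + 1)) := by
            intro g
            rw [ih g (hi + 1) hshift]
            refine congrArg some (Prod.ext rfl ?_)
            push_cast; ring
          simp only [aLoop, hs', hgsi, List.filterMap_cons, hp, if_neg ha]
          cases hget : PySem.Dict.get? d a with
          | none =>
            dsimp only
            rw [hstep]
            simp only [List.foldl_cons, pvStepA, hget]
            norm_cast
          | some se =>
            dsimp only
            rw [hstep]
            simp only [List.foldl_cons, pvStepA, hget]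
            norm_cast

theorem pv_bGroups_eq (hyp_align : List String) (n : Nat) (hi : Int)
    (g : PySem.Dict String (List String)) :
    (List.range n).foldl (fun g (i : Nat) =>
      let s := PySem.List.pyGetD hyp_align (hi + (i : Int)) ""
      let parts := pvSplit s "-"
      if s ≠ "-" ∧ parts.headD "" ≠ "" then
        g.modify (parts.headD "") [] (fun l => l ++ [parts[1]?.getD ""])
      else g) g
    = ((pvEntries hyp_align hi n).filterMap pvParse).foldl pvStepB g := by
  rw [pv_foldl_filterMap]
  rw [show pvEntries hyp_align hi n = (List.range n).map (fun (j : Nat) => PySem.List.pyGetD hyp_align (hi + (j : Int)) "") from rfl, List.foldl_map]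
  apply PySem.List.foldl_congr_mem
  intro acc i _
  by_cases h1 : PySem.List.pyGetD hyp_align (hi + (i : Int)) "" = "-"
  · simp [pvParse, h1]
  · by_cases h2 : (pvSplit (PySem.List.pyGetD hyp_align (hi + (i : Int)) "") "-").head?.getD "" = ""
    · simp [pvParse, h1, h2]
    · simp [pvParse, pvStepB, h1, h2]

theorem pv_getA (ps : List (String × String)) (k : String) :
    PySem.Dict.get? (ps.foldl pvStepA PySem.Dict.empty) k
      = match (ps.filter (fun p => p.1 == k)).map (·.2) with
        | [] => none
        | x :: t => some (t.foldl (fun m y => min y m) x, t.foldl (fun m y => max y m) x) := by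
  induction ps using List.reverseRecOn with
  | nil => simp [PySem.Dict.get?_empty]
  | append_singleton ps p ih =>
    rw [List.foldl_append, List.foldl_cons, List.foldl_nil, List.filter_append,
        List.map_append]
    show PySem.Dict.get? (pvStepA (ps.foldl pvStepA PySem.Dict.empty) p) k = _
    rw [pvStepA, PySem.Dict.get?_insert]
    by_cases hk : k = p.1
    · subst hk
      rw [if_pos rfl, ih]
      rcases hf : (ps.filter (fun q => q.1 == p.1)).map (·.2) with _ | ⟨x, t⟩ <;>
        simp [hf, List.foldl_append]
    · rw [if_neg hk, ih]
      have hb : (p.1 == k) = false := beq_eq_false_iff_ne.mpr (Ne.symm hk)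
      simp [hb]

theorem pv_items_eq (ps : List (String × String)) :
    (ps.foldl pvStepA PySem.Dict.empty).items
      = ((ps.foldl pvStepB PySem.Dict.empty).items).map (fun q =>
          (q.1, ((PySem.List.min? q.2 (fun x => x)).getD "", (PySem.List.max? q.2 (fun x => x)).getD ""))) := by
  have hA : ps.foldl pvStepA PySem.Dict.empty
      = ps.foldl (fun d p => d.insert p.1 (match PySem.Dict.get? d p.1 with
          | none => (p.2, p.2)
          | some se => (min p.2 se.1, max p.2 se.2))) PySem.Dict.empty := rfl
  have hB : ps.foldl pvStepB PySem.Dict.empty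
      = ps.foldl (fun g p => g.modify p.1 [] (fun l => l ++ [p.2])) PySem.Dict.empty := rfl
  have hndA : (ps.foldl pvStepA PySem.Dict.empty).keys.Nodup := by
    rw [hA]
    exact PySem.Dict.nodup_keys_foldl_insert_key ps Prod.fst _ _ (by simp [PySem.Dict.keys_empty])
  have hndB : (ps.foldl pvStepB PySem.Dict.empty).keys.Nodup := by
    rw [hB]
    exact PySem.Dict.nodup_keys_foldl_modify_key ps Prod.fst [] _ _ (by simp [PySem.Dict.keys_empty])
  have hkA : (ps.foldl pvStepA PySem.Dict.empty).keys = PySem.Set.update [] (ps.map Prod.fst) := by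
    rw [hA, PySem.Dict.keys_foldl_insert_key, PySem.Dict.keys_empty]
  have hkB : (ps.foldl pvStepB PySem.Dict.empty).keys = PySem.Set.update [] (ps.map Prod.fst) := by
    rw [hB, PySem.Dict.keys_foldl_modify_key, PySem.Dict.keys_empty]
  rw [PySem.Dict.items_eq_map_keys _ hndA ("", ""), PySem.Dict.items_eq_map_keys _ hndB [],
      List.map_map, hkA, hkB]
  apply List.map_congr_left
  intro k hk
  have hkmem : k ∈ ps.map Prod.fst := by
    rcases (PySem.Set.mem_update [] (ps.map Prod.fst) k).mp hk with h | h
    · simp at h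
    · exact h
  have hvB : (ps.foldl pvStepB PySem.Dict.empty).getD k []
      = (ps.filter (fun p => p.1 == k)).map (·.2) := by
    rw [hB, PySem.Dict.getD_foldl_modify_append, PySem.Dict.getD_empty]
    rfl
  have hfne : (ps.filter (fun p => p.1 == k)).map (·.2) ≠ [] := by
    rcases List.mem_map.mp hkmem with ⟨p, hp, hpk⟩
    simp only [ne_eq, List.map_eq_nil_iff, List.filter_eq_nil_iff]
    intro hall
    exact hall p hp (by simp [hpk])
  rcases hf : (ps.filter (fun p => p.1 == k)).map (·.2) with _ | ⟨x, t⟩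
  · exact absurd hf hfne
  · have hvA : (ps.foldl pvStepA PySem.Dict.empty).getD k ("", "")
        = (t.foldl (fun m y => min y m) x, t.foldl (fun m y => max y m) x) := by
      rw [PySem.Dict.getD_eq_get?_getD, pv_getA, hf]
      rfl
    rw [Function.comp_apply, hvA, hvB, hf]
    simp only [PySem.List.min?_id_cons, PySem.List.max?_id_cons, Option.getD_some]
    have hmin : (fun (m y : String) => min y m) = (fun m y => min m y) := by
      funext m y; exact min_comm y m
    have hmax : (fun (m y : String) => max y m) = (fun m y => max m y) := by
      funext m y; exact max_comm y m
    rw [hmin, hmax]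

-- ===== VERDICT (by name: the statement is the Claim_ definition above) =====
theorem getSpkAlignInfo_spec : Claim_equal_getSpkAlignInfo := by
  intro u hyp hi _ hpre
  unfold Spec_getSpkAlignInfo
  simp only [getSpkAlignInfo, getSpkAlignInfo_alt, getUtteranceLen]
  rw [pv_aLoop_eq hyp ((pvSplit u " ").drop 1).length PySem.Dict.empty hi hpre]
  rw [pv_bGroups_eq hyp ((pvSplit u " ").drop 1).length hi PySem.Dict.empty]
  exact Prod.ext (pv_items_eq _) rfl
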